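-- pv_equiv track=rewrite | github.com/3am-r/pico-morti | apps/hijri_calendar.py | calculate_days_until_event
-- ===== SOURCE A (Python) =====
-- def calculate_days_until_event(current_month, current_day, event_month, event_day):
--     """Calculate days until event in same Hijri year"""
--     if current_month == event_month:
--         return max(0, event_day - current_day)
--
--     # Simplified calculation using average month length
--     days = 0
--
--     # Days remaining in current month
--     days_in_month = [30, 29, 30, 29, 30, 29, 30, 29, 30, 29, 30, 29]
--     days += days_in_month[current_month - 1] - current_day
--
--     # Days in intervening months
--     for month in range(current_month + 1, event_month):
--         days += days_in_month[month - 1]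
--
--     # Days in event month
--     days += event_day
--
--     return days
-- ===== SOURCE B (Python) =====
-- def calculate_days_until_event(current_month, current_day, event_month, event_day):
--     """Calculate days until event in same Hijri year"""
--     if current_month == event_month:
--         return max(0, event_day - current_day)
--     # Month lengths alternate 30, 29 starting at month 1, so the length of
--     # month m is 30 for odd m and 29 for even m (mod 12 preserves parity).
--     month_len = 30 if current_month % 2 == 1 else 29
--     # Closed-form sum of the lengths of the intervening months a..b:
--     # 29 per month plus one extra day per odd month.
--     a = current_month + 1
--     b = event_month - 1
--     between = 29 * (b - a + 1) + ((b + 1) // 2 - a // 2) if b >= a else 0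
--     return month_len - current_day + between + event_day
-- ===== Notes on version B (the rewrite author's own statement) =====
-- stated objective: alternative
-- what changed: Replaces A's month-length table lookup and intervening-month loop with a closed-form arithmetic formula: month length from the month's parity and the intervening-month sum as 29 per month plus a floor-division count of odd months.
import Mathlib
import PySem

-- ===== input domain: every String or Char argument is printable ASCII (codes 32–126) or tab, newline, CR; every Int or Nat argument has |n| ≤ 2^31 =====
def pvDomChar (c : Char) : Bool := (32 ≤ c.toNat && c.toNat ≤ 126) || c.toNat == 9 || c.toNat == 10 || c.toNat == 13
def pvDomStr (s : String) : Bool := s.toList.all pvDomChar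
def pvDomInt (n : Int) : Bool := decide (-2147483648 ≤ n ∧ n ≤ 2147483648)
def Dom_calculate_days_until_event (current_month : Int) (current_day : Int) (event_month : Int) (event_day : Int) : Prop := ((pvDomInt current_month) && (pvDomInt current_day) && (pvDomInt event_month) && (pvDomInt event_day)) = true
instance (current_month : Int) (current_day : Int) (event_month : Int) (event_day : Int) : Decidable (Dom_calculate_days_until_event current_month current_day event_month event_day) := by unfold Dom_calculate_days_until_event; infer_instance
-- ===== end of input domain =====

-- B replaces A's table lookup and intervening-month loop with a closed-form parity/floordiv formula (alternative, O(1)).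

-- ===== PORT A =====
def pvDaysInMonth : List Int := [30, 29, 30, 29, 30, 29, 30, 29, 30, 29, 30, 29]

def calculate_days_until_event (current_month : Int) (current_day : Int) (event_month : Int) (event_day : Int) : Int :=
  if current_month = event_month then
    max 0 (event_day - current_day)
  else
    -- days += days_in_month[current_month - 1] - current_day  (pyGet?; none = IndexError, excluded by Pre_)
    let days : Int := 0 + ((PySem.List.pyGet? pvDaysInMonth (current_month - 1)).getD 0 - current_day)
    -- for month in range(current_month + 1, event_month): days += days_in_month[month - 1]
    let days := (PySem.List.pyRange (current_month + 1) event_month 1).foldl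
      (fun d month => d + (PySem.List.pyGet? pvDaysInMonth (month - 1)).getD 0) days
    days + event_day

-- ===== PORT B =====
def calculate_days_until_event_alt (current_month : Int) (current_day : Int) (event_month : Int) (event_day : Int) : Int :=
  if current_month = event_month then
    max 0 (event_day - current_day)
  else
    let month_len : Int := if PySem.Int.mod current_month 2 = 1 then 30 else 29
    let a := current_month + 1
    let b := event_month - 1
    let between : Int :=
      if b ≥ a then 29 * (b - a + 1) + (PySem.Int.floordiv (b + 1) 2 - PySem.Int.floordiv a 2) else 0
    month_len - current_day + between + event_day

-- ===== PRECONDITION & SPEC =====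
-- Exactly the inputs on which A returns: otherwise days_in_month[...] raises IndexError
-- (current_month - 1 outside Python's index range, or an intervening month index out of range).
def Pre_calculate_days_until_event (current_month : Int) (current_day : Int) (event_month : Int) (event_day : Int) : Prop :=
  current_month = event_month ∨ (-11 ≤ current_month ∧ current_month ≤ 12 ∧ event_month ≤ 13)
instance (current_month : Int) (current_day : Int) (event_month : Int) (event_day : Int) : Decidable (Pre_calculate_days_until_event current_month current_day event_month event_day) := by unfold Pre_calculate_days_until_event; infer_instance

def pvWitness_calculate_days_until_event : Int × Int × Int × Int := (2, 10, 7, 5)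

def Spec_calculate_days_until_event (current_month : Int) (current_day : Int) (event_month : Int) (event_day : Int) (out : Int) : Prop := out = calculate_days_until_event_alt current_month current_day event_month event_day
instance (current_month : Int) (current_day : Int) (event_month : Int) (event_day : Int) (out : Int) : Decidable (Spec_calculate_days_until_event current_month current_day event_month event_day out) := by unfold Spec_calculate_days_until_event; infer_instance

-- ===== CLAIM (what is proved, stated in full; the proofs are below) =====
def Claim_equal_calculate_days_until_event : Prop := ∀ (current_month : Int) (current_day : Int) (event_month : Int) (event_day : Int), Dom_calculate_days_until_event current_month current_day event_month event_day → Pre_calculate_days_until_event current_month current_day event_month event_day → Spec_calculate_days_until_event current_month current_day event_month event_day (calculate_days_until_event current_month current_day event_month event_day)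

-- ===== LEMMAS AND PROOFS =====

-- The month-length lookup equals the parity formula on the valid index range.
lemma pv_lookup_eq (m : Int) (h1 : -11 ≤ m) (h2 : m ≤ 12) :
    (PySem.List.pyGet? pvDaysInMonth (m - 1)).getD 0
      = (if PySem.Int.mod m 2 = 1 then (30 : Int) else 29) := by
  interval_cases m <;> decide

-- The intervening-month fold equals the closed-form sum, by induction on the range length.
lemma pv_fold_aux (a : Int) (ha : -10 ≤ a) : ∀ (n : Nat) (d : Int), a + n ≤ 13 →
    (PySem.List.pyRange a (a + n) 1).foldl
        (fun d month => d + (PySem.List.pyGet? pvDaysInMonth (month - 1)).getD 0) d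
      = d + (if a + n - 1 ≥ a then 29 * (a + n - 1 - a + 1) + (PySem.Int.floordiv (a + n) 2 - PySem.Int.floordiv a 2) else 0) := by
  intro n
  induction n with
  | zero =>
    intro d _
    rw [show a + ((0 : Nat) : Int) = a by norm_num, PySem.List.pyRange_one_eq_nil le_rfl]
    simp
  | succ n ih =>
    intro d hle
    have hcast : a + ((n + 1 : Nat) : Int) = (a + n) + 1 := by push_cast; ring
    rw [hcast, PySem.List.pyRange_one_succ_right (by omega), List.foldl_append]
    simp only [List.foldl_cons, List.foldl_nil]
    rw [ih d (by omega), pv_lookup_eq (a + n) (by omega) (by omega)]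
    simp only [PySem.Int.floordiv_eq_ediv_of_pos (show (0:Int) < 2 by norm_num),
      PySem.Int.mod_eq_emod_of_pos (show (0:Int) < 2 by norm_num)]
    split_ifs <;> omega

lemma pv_fold_eq (a b : Int) (ha : -10 ≤ a) (hb : b ≤ 13) (d : Int) :
    (PySem.List.pyRange a b 1).foldl
        (fun d month => d + (PySem.List.pyGet? pvDaysInMonth (month - 1)).getD 0) d
      = d + (if b - 1 ≥ a then 29 * (b - 1 - a + 1) + (PySem.Int.floordiv b 2 - PySem.Int.floordiv a 2) else 0) := by
  by_cases hba : b ≤ a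
  · rw [PySem.List.pyRange_one_eq_nil hba]
    have : ¬ (b - 1 ≥ a) := by omega
    simp [this]
  · have hb' : b = a + ((b - a).toNat : Int) := by omega
    rw [hb']
    exact pv_fold_aux a ha (b - a).toNat d (by omega)

-- ===== VERDICT (by name: the statement is the Claim_ definition above) =====
theorem calculate_days_until_event_spec : Claim_equal_calculate_days_until_event := by
  intro cm cd em ed _ hpre
  unfold Spec_calculate_days_until_event calculate_days_until_event calculate_days_until_event_alt
  by_cases h : cm = em
  · simp [h]
  · simp only [if_neg h]
    rcases hpre with h' | ⟨h1, h2, h3⟩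
    · exact absurd h' h
    rw [pv_fold_eq (cm + 1) em (by omega) h3]
    rw [pv_lookup_eq cm h1 h2]
    split_ifs <;> ring_nf
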